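-- pv_equiv track=rewrite | github.com/beneslami/M_GPU_output | measurements/calculate_link_usage.py | return_pdf
-- ===== SOURCE A (Python) =====
-- def return_pdf(data):
--     pdf = {}
--     for k, v in data.items():
--         if v not in pdf.keys():
--             pdf[v] = 1
--         else:
--             pdf[v] += 1
--     pdf = dict(sorted(pdf.items(), key=lambda x: x[0]))
--     return pdf
-- ===== SOURCE B (Python) =====
-- def return_pdf(data):
--     # sort the values once, then group equal consecutive values by run length;
--     # keys are inserted in ascending order, so no final sort is needed
--     vs = sorted(data.values())
--     pdf = {}
--     while vs:
--         v = vs[0]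
--         run = 1
--         while run < len(vs) and vs[run] == v:
--             run += 1
--         pdf[v] = run
--         vs = vs[run:]
--     return pdf
-- ===== Notes on version B (the rewrite author's own statement) =====
-- stated objective: alternative
-- what changed: A counts value frequencies in a dict and then sorts the keys; B sorts the values once and groups equal consecutive values into run lengths, so the result dict is built directly in ascending key order with no counting dict and no final sort.
import Mathlib
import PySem

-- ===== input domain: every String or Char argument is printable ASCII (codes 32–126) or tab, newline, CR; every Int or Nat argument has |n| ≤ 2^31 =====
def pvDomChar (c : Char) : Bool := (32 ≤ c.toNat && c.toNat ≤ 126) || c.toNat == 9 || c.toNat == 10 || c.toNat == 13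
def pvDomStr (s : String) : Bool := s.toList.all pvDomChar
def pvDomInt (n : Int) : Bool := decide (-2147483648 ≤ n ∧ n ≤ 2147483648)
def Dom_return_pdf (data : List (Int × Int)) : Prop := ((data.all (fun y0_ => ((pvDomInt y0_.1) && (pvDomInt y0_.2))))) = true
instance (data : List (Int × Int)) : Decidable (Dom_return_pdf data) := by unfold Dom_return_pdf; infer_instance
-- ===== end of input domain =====

-- B replaces A's hash-count-then-sort-keys with sort-values-then-group-consecutive-runs (same cost class; no final sort).

-- ===== PORT A =====
-- for k, v in data.items(): if v not in pdf.keys(): pdf[v] = 1 else: pdf[v] += 1; then sort items by key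
def return_pdf (data : List (Int × Int)) : List (Int × Int) :=
  let pdf : PySem.Dict Int Int :=
    data.foldl (fun d kv =>
      if !d.contains kv.2 then d.insert kv.2 1
      else d.insert kv.2 (d.getD kv.2 0 + 1)) PySem.Dict.empty
  PySem.List.sorted pdf.items (fun x => x.1) false

-- ===== PORT B =====
-- 'while vs: v = vs[0]; count the run of v; pdf[v] = run; vs = vs[run:]'
def pvRuns (vs : List Int) : List (Int × Int) :=
  match vs with
  | [] => []
  | v :: rest =>
      (v, 1 + ((rest.takeWhile (· == v)).length : Int)) :: pvRuns (rest.dropWhile (· == v))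
termination_by vs.length
decreasing_by
  exact Nat.lt_succ_of_le (List.length_dropWhile_le _ _)

def return_pdf_alt (data : List (Int × Int)) : List (Int × Int) :=
  pvRuns (PySem.List.sorted (data.map Prod.snd) (fun x => x) false)

-- ===== PRECONDITION & SPEC =====
def Spec_return_pdf (data : List (Int × Int)) (out : List (Int × Int)) : Prop := out = return_pdf_alt data
instance (data : List (Int × Int)) (out : List (Int × Int)) : Decidable (Spec_return_pdf data out) := by unfold Spec_return_pdf; infer_instance

-- ===== CLAIM (what is proved, stated in full; the proofs are below) =====
def Claim_equal_return_pdf : Prop := ∀ (data : List (Int × Int)), Dom_return_pdf data → Spec_return_pdf data (return_pdf data)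

-- ===== LEMMAS AND PROOFS =====

-- keys produced by pvRuns come from the input list
lemma pvRuns_key_mem : ∀ (l : List Int) (p : Int × Int), p ∈ pvRuns l → p.1 ∈ l := by
  intro l
  induction l using pvRuns.induct with
  | case1 => intro p hp; simp [pvRuns] at hp
  | case2 v rest ih =>
    intro p hp
    rw [pvRuns] at hp
    rcases List.mem_cons.1 hp with rfl | h
    · simp
    · exact List.mem_cons_of_mem _
        ((List.dropWhile_sublist (· == v)).mem (ih p h))

-- on a ≤-sorted list every element of the dropped tail is strictly greater than the head value
lemma dropWhile_gt (v : Int) : ∀ (rest : List Int), rest.Pairwise (· ≤ ·) →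
    (∀ y ∈ rest, v ≤ y) → ∀ y ∈ rest.dropWhile (· == v), v < y := by
  intro rest
  induction rest with
  | nil => intro _ _ y hy; simp at hy
  | cons h t ih =>
    intro hpw hle y hy
    by_cases hv : h = v
    · rw [List.dropWhile_cons_of_pos (by simp [hv])] at hy
      exact ih (List.pairwise_cons.1 hpw).2
        (fun z hz => hle z (List.mem_cons_of_mem _ hz)) y hy
    · rw [List.dropWhile_cons_of_neg (by simp [hv])] at hy
      have hvh : v < h := lt_of_le_of_ne (hle h (List.mem_cons_self)) (Ne.symm hv)
      rcases List.mem_cons.1 hy with rfl | hy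
      · exact hvh
      · exact lt_of_lt_of_le hvh ((List.pairwise_cons.1 hpw).1 y hy)

-- the grouping pass produces strictly increasing keys
lemma pvRuns_pairwise : ∀ (l : List Int), l.Pairwise (· ≤ ·) →
    (pvRuns l).Pairwise (fun a b => a.1 < b.1) := by
  intro l
  induction l using pvRuns.induct with
  | case1 => intro _; simp [pvRuns]
  | case2 v rest ih =>
    intro hpw
    have hrest := (List.pairwise_cons.1 hpw).2
    have hle := (List.pairwise_cons.1 hpw).1
    rw [pvRuns]
    refine List.pairwise_cons.2 ⟨?_, ih (List.Pairwise.sublist (List.dropWhile_sublist (· == v)) hrest)⟩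
    intro p hp
    exact dropWhile_gt v rest hrest hle p.1 (pvRuns_key_mem _ p hp)

-- membership characterisation: on a ≤-sorted list, pvRuns lists exactly the (value, multiplicity) pairs
lemma pvRuns_mem : ∀ (l : List Int), l.Pairwise (· ≤ ·) →
    ∀ x : Int × Int, x ∈ pvRuns l ↔ x.1 ∈ l ∧ x.2 = (l.count x.1 : Int) := by
  intro l
  induction l using pvRuns.induct with
  | case1 => intro _ x; simp [pvRuns]
  | case2 v rest ih =>
    intro hpw x
    have hrest := (List.pairwise_cons.1 hpw).2
    have hle := (List.pairwise_cons.1 hpw).1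
    have hsplit : rest.takeWhile (· == v) ++ rest.dropWhile (· == v) = rest :=
      List.takeWhile_append_dropWhile
    have htake : ∀ y ∈ rest.takeWhile (· == v), y = v := by
      intro y hy
      simpa using List.mem_takeWhile_imp hy
    have hdrop : ∀ y ∈ rest.dropWhile (· == v), v < y := dropWhile_gt v rest hrest hle
    have hcount : ∀ k : Int, (v :: rest).count k =
        (if k = v then 1 else 0) + (rest.takeWhile (· == v)).count k
          + (rest.dropWhile (· == v)).count k := by
      intro k
      conv_lhs => rw [← hsplit]
      rw [List.count_cons, List.count_append]
      by_cases h : k = v <;> simp [h] <;> omega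
    have hcv : ((v :: rest).count v : Int) = 1 + ((rest.takeWhile (· == v)).length : Int) := by
      rw [hcount v]
      have h1 : (rest.takeWhile (· == v)).count v = (rest.takeWhile (· == v)).length :=
        List.count_eq_length.2 (fun y hy => (htake y hy).symm)
      have h2 : (rest.dropWhile (· == v)).count v = 0 :=
        List.count_eq_zero.2 (fun hmem => lt_irrefl v (hdrop v hmem))
      simp [h1, h2]
    have hck : ∀ k : Int, k ≠ v → (v :: rest).count k = (rest.dropWhile (· == v)).count k := by
      intro k hk
      rw [hcount k]
      have h1 : (rest.takeWhile (· == v)).count k = 0 :=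
        List.count_eq_zero.2 (fun hmem => hk (htake k hmem))
      simp [hk, h1]
    rw [pvRuns]
    constructor
    · intro hx
      rcases List.mem_cons.1 hx with rfl | hx
      · exact ⟨List.mem_cons_self, hcv.symm⟩
      · obtain ⟨hm, hc⟩ := (ih (List.Pairwise.sublist (List.dropWhile_sublist (· == v)) hrest) x).1 hx
        have hne : x.1 ≠ v := fun h => lt_irrefl v (h ▸ hdrop x.1 hm)
        refine ⟨List.mem_cons_of_mem _ ((List.dropWhile_sublist (· == v)).mem hm), ?_⟩
        rw [hc, hck x.1 hne]
    · rintro ⟨hm, hc⟩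
      by_cases hkv : x.1 = v
      · have : x.2 = 1 + ((rest.takeWhile (· == v)).length : Int) := by rw [hc, hkv, hcv]
        exact List.mem_cons.2 (Or.inl (Prod.ext hkv this))
      · refine List.mem_cons.2 (Or.inr ?_)
        have hm' : x.1 ∈ rest.dropWhile (· == v) := by
          rcases List.mem_cons.1 hm with h | h
          · exact absurd h hkv
          · rw [← hsplit] at h
            rcases List.mem_append.1 h with h | h
            · exact absurd (htake _ h) hkv
            · exact h
        exact (ih (List.Pairwise.sublist (List.dropWhile_sublist (· == v)) hrest) x).2
          ⟨hm', by rw [hc, hck x.1 hkv]⟩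

-- A's counting loop over data is Counter(values)
lemma return_pdf_dict_eq_counter (data : List (Int × Int)) :
    data.foldl (fun d kv =>
      if !d.contains kv.2 then d.insert kv.2 1
      else d.insert kv.2 (d.getD kv.2 0 + 1)) PySem.Dict.empty
      = PySem.Dict.counter (data.map Prod.snd) := by
  rw [← PySem.Dict.foldl_insert_getD_add_one_eq_counter, List.foldl_map]
  apply PySem.List.foldl_congr_mem
  intro d kv _
  by_cases h : d.contains kv.2
  · simp [h]
  · have h0 : d.getD kv.2 0 = 0 :=
      PySem.Dict.getD_of_not_contains d 0 (by simpa using h)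
    simp [h, h0]

lemma return_pdf_eq (data : List (Int × Int)) : return_pdf data = return_pdf_alt data := by
  rw [return_pdf, return_pdf_alt, return_pdf_dict_eq_counter, PySem.Dict.items_counter]
  set vs := data.map Prod.snd with hvs
  set svs := PySem.List.sorted vs (fun x => x) false with hsvs
  have hperm : svs.Perm vs := PySem.List.sorted_perm vs (fun x => x) false
  have hpw : svs.Pairwise (· ≤ ·) := by
    apply List.pairwise_iff_getElem.2
    intro i j hi hj hij
    exact PySem.List.sorted_id_getElem_mono vs (Nat.le_of_lt hij) hj
  have hmemB : ∀ x : Int × Int, x ∈ pvRuns svs ↔ x.1 ∈ vs ∧ x.2 = (vs.count x.1 : Int) := by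
    intro x
    rw [pvRuns_mem svs hpw x, hperm.mem_iff, hperm.count_eq]
  have hmemA : ∀ x : Int × Int,
      x ∈ (PySem.Set.ofList vs).map (fun k => (k, (vs.count k : Int))) ↔
        x.1 ∈ vs ∧ x.2 = (vs.count x.1 : Int) := by
    intro x
    rw [List.mem_map]
    constructor
    · rintro ⟨k, hk, rfl⟩
      exact ⟨(PySem.Set.mem_ofList vs k).1 hk, rfl⟩
    · rintro ⟨hm, hc⟩
      exact ⟨x.1, (PySem.Set.mem_ofList vs x.1).2 hm, by rw [← hc]⟩
  have hpwB : (pvRuns svs).Pairwise (fun a b => a.1 < b.1) := pvRuns_pairwise svs hpw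
  have hndB : (pvRuns svs).Nodup := hpwB.imp (fun h => by
    intro he; rw [he] at h; exact lt_irrefl _ h)
  have hndA : ((PySem.Set.ofList vs).map (fun k => (k, (vs.count k : Int)))).Nodup :=
    (PySem.Set.nodup_ofList vs).map (fun a b hab => congrArg Prod.fst hab)
  have hp : (pvRuns svs).Perm ((PySem.Set.ofList vs).map (fun k => (k, (vs.count k : Int)))) :=
    (List.perm_ext_iff_of_nodup hndB hndA).2 (fun x => by rw [hmemB x, hmemA x])
  exact PySem.List.sorted_eq_of_perm_of_pairwise_lt _ _ _ hp hpwB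

-- ===== VERDICT (by name: the statement is the Claim_ definition above) =====
theorem return_pdf_spec : Claim_equal_return_pdf := by
  intro data _
  exact return_pdf_eq data
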